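-- pv_equiv track=rewrite | github.com/XVX-016/AOC | solutions/Day 09/part1.py | is_rectangle_valid
-- ===== SOURCE A (Python) =====
-- def is_rectangle_valid(x1, y1, x2, y2, green_red_set):
--     x_start, x_end = sorted([x1, x2])
--     y_start, y_end = sorted([y1, y2])
--     for x in range(x_start, x_end + 1):
--         for y in range(y_start, y_end + 1):
--             if (x, y) not in green_red_set:
--                 return False
--     return True
-- ===== SOURCE B (Python) =====
-- def is_rectangle_valid(x1, y1, x2, y2, green_red_set):
--     x_start, x_end = (x1, x2) if x1 <= x2 else (x2, x1)
--     y_start, y_end = (y1, y2) if y1 <= y2 else (y2, y1)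
--     area = (x_end - x_start + 1) * (y_end - y_start + 1)
--     count = 0
--     for (px, py) in green_red_set:
--         if x_start <= px <= x_end and y_start <= py <= y_end:
--             count += 1
--     return count == area
-- ===== Notes on version B (the rewrite author's own statement) =====
-- stated objective: alternative
-- what changed: Instead of scanning every grid cell and testing set membership with early exit, B scans the set once, counts the members inside the rectangle, and compares that count with the rectangle's area (distinct elements make the count at most the area); Pre_ states the set-encoding invariant that the list has no duplicate elements.
import Mathlib
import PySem

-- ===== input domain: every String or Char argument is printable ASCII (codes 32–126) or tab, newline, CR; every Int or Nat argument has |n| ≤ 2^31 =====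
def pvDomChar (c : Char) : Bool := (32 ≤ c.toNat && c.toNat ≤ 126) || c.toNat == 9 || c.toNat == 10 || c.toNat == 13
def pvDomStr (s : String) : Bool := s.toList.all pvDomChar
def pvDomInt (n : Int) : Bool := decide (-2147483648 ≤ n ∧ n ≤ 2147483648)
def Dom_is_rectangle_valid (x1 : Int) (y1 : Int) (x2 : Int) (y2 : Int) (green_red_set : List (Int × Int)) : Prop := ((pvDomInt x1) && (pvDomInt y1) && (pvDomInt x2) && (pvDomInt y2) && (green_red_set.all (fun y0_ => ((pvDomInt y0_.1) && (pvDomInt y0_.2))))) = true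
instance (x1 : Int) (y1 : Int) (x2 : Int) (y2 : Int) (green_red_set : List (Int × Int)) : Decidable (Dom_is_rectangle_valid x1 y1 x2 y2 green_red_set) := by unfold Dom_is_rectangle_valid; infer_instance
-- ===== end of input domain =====

-- B replaces A's scan over every grid cell (membership test per cell) by one pass over the
-- set, counting the members inside the rectangle and comparing the count with the area.

-- ===== PORT A =====
-- inner 'for y in range(y_start, y_end + 1)' with early 'return False'
def pvA_loopY (s : List (Int × Int)) (x y_end : Int) (y : Int) : Bool :=
  if y ≤ y_end then
    if s.contains (x, y) then pvA_loopY s x y_end (y + 1) else false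
  else true
termination_by (y_end + 1 - y).toNat
decreasing_by omega

-- outer 'for x in range(x_start, x_end + 1)', propagating the early 'return False'
def pvA_loopX (s : List (Int × Int)) (y_start y_end x_end : Int) (x : Int) : Bool :=
  if x ≤ x_end then
    if pvA_loopY s x y_end y_start then pvA_loopX s y_start y_end x_end (x + 1) else false
  else true
termination_by (x_end + 1 - x).toNat
decreasing_by omega

def is_rectangle_valid (x1 : Int) (y1 : Int) (x2 : Int) (y2 : Int) (green_red_set : List (Int × Int)) : Bool :=
  -- sorted([x1, x2]) on a two-element list: the smaller value first
  let px := if x1 ≤ x2 then (x1, x2) else (x2, x1)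
  let py := if y1 ≤ y2 then (y1, y2) else (y2, y1)
  pvA_loopX green_red_set py.1 py.2 px.2 px.1

-- ===== PORT B =====
def is_rectangle_valid_alt (x1 : Int) (y1 : Int) (x2 : Int) (y2 : Int) (green_red_set : List (Int × Int)) : Bool :=
  let px := if x1 ≤ x2 then (x1, x2) else (x2, x1)
  let py := if y1 ≤ y2 then (y1, y2) else (y2, y1)
  let area : Int := (px.2 - px.1 + 1) * (py.2 - py.1 + 1)
  let count : Int := green_red_set.foldl
    (fun c pt => if px.1 ≤ pt.1 ∧ pt.1 ≤ px.2 ∧ py.1 ≤ pt.2 ∧ pt.2 ≤ py.2 then c + 1 else c) 0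
  count == area

-- ===== PRECONDITION & SPEC =====
-- green_red_set is a Python set, encoded as the list of its DISTINCT elements; Pre_ states
-- exactly that invariant (with duplicates B's count could exceed the area, a shape a set never has).
def Pre_is_rectangle_valid (x1 : Int) (y1 : Int) (x2 : Int) (y2 : Int) (green_red_set : List (Int × Int)) : Prop :=
  green_red_set.Nodup
instance (x1 : Int) (y1 : Int) (x2 : Int) (y2 : Int) (green_red_set : List (Int × Int)) : Decidable (Pre_is_rectangle_valid x1 y1 x2 y2 green_red_set) := by unfold Pre_is_rectangle_valid; infer_instance

def pvWitness_is_rectangle_valid : Int × Int × Int × Int × (List (Int × Int)) :=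
  (0, 0, 1, 0, [(0, 0), (1, 0)])

def Spec_is_rectangle_valid (x1 : Int) (y1 : Int) (x2 : Int) (y2 : Int) (green_red_set : List (Int × Int)) (out : Bool) : Prop := out = is_rectangle_valid_alt x1 y1 x2 y2 green_red_set
instance (x1 : Int) (y1 : Int) (x2 : Int) (y2 : Int) (green_red_set : List (Int × Int)) (out : Bool) : Decidable (Spec_is_rectangle_valid x1 y1 x2 y2 green_red_set out) := by unfold Spec_is_rectangle_valid; infer_instance

-- ===== CLAIM (what is proved, stated in full; the proofs are below) =====
def Claim_equal_is_rectangle_valid : Prop := ∀ (x1 : Int) (y1 : Int) (x2 : Int) (y2 : Int) (green_red_set : List (Int × Int)), Dom_is_rectangle_valid x1 y1 x2 y2 green_red_set → Pre_is_rectangle_valid x1 y1 x2 y2 green_red_set → Spec_is_rectangle_valid x1 y1 x2 y2 green_red_set (is_rectangle_valid x1 y1 x2 y2 green_red_set)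

-- ===== LEMMAS AND PROOFS =====

-- B's fold is an accumulator-threaded countP
theorem foldl_count_eq (P : Int × Int → Prop) [DecidablePred P]
    (s : List (Int × Int)) (c : Int) :
    s.foldl (fun c pt => if P pt then c + 1 else c) c = c + s.countP (fun pt => decide (P pt)) := by
  induction s generalizing c with
  | nil => simp
  | cons hd tl ih =>
    simp only [List.foldl_cons, List.countP_cons, ih]
    by_cases h : P hd
    · simp only [if_pos h, decide_eq_true h]
      push_cast
      ring
    · simp [h]

-- the count of in-rectangle members of a duplicate-free list equals the area
-- iff every cell of the rectangle is in the list
theorem count_eq_area_iff (xs xe ys ye : Int) (s : List (Int × Int)) (hs : s.Nodup) :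
    (s.countP (fun pt => decide (xs ≤ pt.1 ∧ pt.1 ≤ xe ∧ ys ≤ pt.2 ∧ pt.2 ≤ ye))
      = (xe + 1 - xs).toNat * (ye + 1 - ys).toNat)
    ↔ (∀ x y, xs ≤ x → x ≤ xe → ys ≤ y → y ≤ ye → (x, y) ∈ s) := by
  classical
  set F : Finset (Int × Int) := Finset.Icc xs xe ×ˢ Finset.Icc ys ye with hF
  have hPF : ∀ pt : Int × Int,
      (xs ≤ pt.1 ∧ pt.1 ≤ xe ∧ ys ≤ pt.2 ∧ pt.2 ≤ ye) ↔ pt ∈ F := by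
    intro pt
    simp [hF, Finset.mem_product, Finset.mem_Icc]
    tauto
  have hFcard : F.card = (xe + 1 - xs).toNat * (ye + 1 - ys).toNat := by
    simp [hF, Finset.card_product, Int.card_Icc]
  set T : Finset (Int × Int) :=
    s.toFinset.filter (fun pt => xs ≤ pt.1 ∧ pt.1 ≤ xe ∧ ys ≤ pt.2 ∧ pt.2 ≤ ye) with hT
  have hTsub : T ⊆ F := by
    intro pt hpt
    rw [hT, Finset.mem_filter] at hpt
    exact (hPF pt).1 hpt.2
  have hcount : s.countP (fun pt => decide (xs ≤ pt.1 ∧ pt.1 ≤ xe ∧ ys ≤ pt.2 ∧ pt.2 ≤ ye))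
      = T.card := by
    rw [List.countP_eq_length_filter, hT,
      ← List.toFinset_card_of_nodup (hs.filter (fun pt => decide (xs ≤ pt.1 ∧ pt.1 ≤ xe ∧ ys ≤ pt.2 ∧ pt.2 ≤ ye)))]
    congr 1
    ext pt
    simp [List.mem_toFinset]
  rw [hcount, ← hFcard]
  constructor
  · intro hcard x y hx1 hx2 hy1 hy2
    have hTF : T = F := Finset.eq_of_subset_of_card_le hTsub (le_of_eq hcard.symm)
    have hmem : (x, y) ∈ T := by
      rw [hTF]
      exact (hPF (x, y)).1 ⟨hx1, hx2, hy1, hy2⟩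
    rw [hT, Finset.mem_filter, List.mem_toFinset] at hmem
    exact hmem.1
  · intro hall
    have hTF : T = F := by
      apply Finset.Subset.antisymm hTsub
      intro pt hpt
      have hP := (hPF pt).2 hpt
      rw [hT, Finset.mem_filter, List.mem_toFinset]
      exact ⟨hall pt.1 pt.2 hP.1 hP.2.1 hP.2.2.1 hP.2.2.2, hP⟩
    rw [hTF]


theorem pvA_loopY_eq (s : List (Int × Int)) (x y_end y : Int) :
    pvA_loopY s x y_end y
      = ((PySem.List.pyRange y (y_end + 1) 1).all fun yy => s.contains (x, yy)) := by
  fun_induction pvA_loopY s x y_end y with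
  | case1 y h hc ih =>
    rw [ih, PySem.List.pyRange_one_cons (show y < y_end + 1 by omega), List.all_cons, hc]
    simp
  | case2 y h hc =>
    rw [PySem.List.pyRange_one_cons (show y < y_end + 1 by omega), List.all_cons]
    rw [Bool.not_eq_true] at hc
    rw [hc]
    simp
  | case3 y h =>
    rw [PySem.List.pyRange_one_eq_nil (show y_end + 1 ≤ y by omega)]
    simp

theorem pvA_loopX_eq (s : List (Int × Int)) (y_start y_end x_end x : Int) :
    pvA_loopX s y_start y_end x_end x
      = ((PySem.List.pyRange x (x_end + 1) 1).all fun xx =>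
          (PySem.List.pyRange y_start (y_end + 1) 1).all fun yy => s.contains (xx, yy)) := by
  fun_induction pvA_loopX s y_start y_end x_end x with
  | case1 x h hc ih =>
    rw [ih, PySem.List.pyRange_one_cons (show x < x_end + 1 by omega), List.all_cons,
      ← pvA_loopY_eq, hc]
    simp
  | case2 x h hc =>
    rw [PySem.List.pyRange_one_cons (show x < x_end + 1 by omega), List.all_cons,
      ← pvA_loopY_eq]
    rw [Bool.not_eq_true] at hc
    rw [hc]
    simp
  | case3 x h =>
    rw [PySem.List.pyRange_one_eq_nil (show x_end + 1 ≤ x by omega)]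
    simp

-- one-rectangle core equivalence, with the bounds already sorted
theorem core_equiv (xs xe ys ye : Int) (s : List (Int × Int)) (hs : s.Nodup)
    (hx : xs ≤ xe) (hy : ys ≤ ye) :
    ((PySem.List.pyRange xs (xe + 1) 1).all fun x =>
      (PySem.List.pyRange ys (ye + 1) 1).all fun y => s.contains (x, y))
    = (s.foldl (fun c pt => if xs ≤ pt.1 ∧ pt.1 ≤ xe ∧ ys ≤ pt.2 ∧ pt.2 ≤ ye then c + 1 else c)
        (0 : Int) == (xe - xs + 1) * (ye - ys + 1)) := by
  rw [foldl_count_eq, Bool.eq_iff_iff]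
  simp only [List.all_eq_true, PySem.List.mem_pyRange_one, beq_iff_eq, zero_add,
    List.contains_iff_mem]
  have key := count_eq_area_iff xs xe ys ye s hs
  have harea : (((xe + 1 - xs).toNat * (ye + 1 - ys).toNat : Nat) : Int)
      = (xe - xs + 1) * (ye - ys + 1) := by
    push_cast [Int.toNat_of_nonneg (show (0:Int) ≤ xe + 1 - xs by omega),
      Int.toNat_of_nonneg (show (0:Int) ≤ ye + 1 - ys by omega)]
    ring
  constructor
  · intro h
    have hc := key.2 (by intro x y h1 h2 h3 h4; exact h x ⟨h1, by omega⟩ y ⟨h3, by omega⟩)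
    calc ((s.countP (fun pt => decide (xs ≤ pt.1 ∧ pt.1 ≤ xe ∧ ys ≤ pt.2 ∧ pt.2 ≤ ye)) : Nat) : Int)
        = (((xe + 1 - xs).toNat * (ye + 1 - ys).toNat : Nat) : Int) := by exact_mod_cast hc
      _ = (xe - xs + 1) * (ye - ys + 1) := harea
  · intro h x hxm y hym
    have hc : s.countP (fun pt => decide (xs ≤ pt.1 ∧ pt.1 ≤ xe ∧ ys ≤ pt.2 ∧ pt.2 ≤ ye))
        = (xe + 1 - xs).toNat * (ye + 1 - ys).toNat := by
      have := h.trans harea.symm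
      exact_mod_cast this
    exact key.1 hc x y hxm.1 (by omega) hym.1 (by omega)

-- ===== VERDICT (by name: the statement is the Claim_ definition above) =====
theorem is_rectangle_valid_spec : Claim_equal_is_rectangle_valid := by
  intro x1 y1 x2 y2 s _ hpre
  unfold Spec_is_rectangle_valid is_rectangle_valid is_rectangle_valid_alt
  by_cases h1 : x1 ≤ x2 <;> by_cases h2 : y1 ≤ y2 <;>
    simp only [if_pos, if_neg, h1, h2, not_false_iff] <;>
    · rw [pvA_loopX_eq]
      exact core_equiv _ _ _ _ s hpre (by omega) (by omega)
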